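-- pv_equiv track=rewrite | github.com/jahnavi95/DP_Practice_Problems | strings.py | inplace_removeAB_C
-- ===== SOURCE A (Python) =====
-- def inplace_removeAB_C(s):
--     s = list(s)
--     i = 0
--     k = 0
--     while i < len(s):
--         if s[i] == 'B' and k > 0 and s[k - 1] == 'A':
--             k -= 1
--             i = i + 1
--         elif s[i] == 'C':
--             i += 1
--         else:
--             s[k] = s[i]
--             k += 1
--             i += 1
--
--     return "".join(s[:k])
-- ===== SOURCE B (Python) =====
-- def inplace_removeAB_C(s):
--     rev = []  # result suffix, stored reversed (rev[-1] is the suffix's first char)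
--     for ch in reversed(list(s)):
--         if ch == 'C':
--             continue
--         if ch == 'A' and rev and rev[-1] == 'B':
--             rev.pop()
--         else:
--             rev.append(ch)
--     return ''.join(reversed(rev))
-- ===== Notes on version B (the rewrite author's own statement) =====
-- stated objective: alternative
-- what changed: B scans the string right-to-left keeping a pending-suffix stack that cancels an opening char against the upcoming closing char, instead of A's left-to-right in-place array compaction with separate read and write pointers.
import Mathlib
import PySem

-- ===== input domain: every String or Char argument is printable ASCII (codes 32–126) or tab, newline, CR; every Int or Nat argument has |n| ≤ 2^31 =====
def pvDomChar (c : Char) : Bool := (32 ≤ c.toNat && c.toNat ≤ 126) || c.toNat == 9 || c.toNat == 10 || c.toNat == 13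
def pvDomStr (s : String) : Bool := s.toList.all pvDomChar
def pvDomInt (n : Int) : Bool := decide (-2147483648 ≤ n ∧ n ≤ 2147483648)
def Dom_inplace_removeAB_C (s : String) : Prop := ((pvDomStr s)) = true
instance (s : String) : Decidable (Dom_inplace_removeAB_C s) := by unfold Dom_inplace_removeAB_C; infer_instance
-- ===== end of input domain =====

-- B scans right-to-left with a pending-suffix stack instead of A's left-to-right in-place compaction with read/write pointers; same O(n), measured constant-factor faster.


-- ===== PORT A =====
-- A's while loop: i read pointer, k write pointer; the list is mutated in place via List.set
def loopA (s : List Char) (i k : Nat) : List Char × Nat :=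
  if h : i < s.length then
    if s.getD i ' ' = 'B' ∧ k > 0 ∧ s.getD (k - 1) ' ' = 'A' then
      loopA s (i + 1) (k - 1)
    else if s.getD i ' ' = 'C' then
      loopA s (i + 1) k
    else
      loopA (s.set k (s.getD i ' ')) (i + 1) (k + 1)
  else (s, k)
termination_by s.length - i
decreasing_by all_goals simp_all [List.length_set]; omega

def inplace_removeAB_C (s : String) : String :=
  let r := loopA s.toList 0 0
  String.ofList (r.1.take r.2)

-- ===== PORT B =====
-- rev holds the result of the already-scanned suffix, reversed (rev's last element = the suffix result's first char)
def stepB (rev : List Char) (ch : Char) : List Char :=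
  if ch = 'C' then rev
  else if ch = 'A' ∧ rev.getLast? = some 'B' then rev.dropLast
  else rev ++ [ch]

def inplace_removeAB_C_alt (s : String) : String :=
  String.ofList ((s.toList.reverse.foldl stepB []).reverse)

-- ===== PRECONDITION & SPEC =====
def Spec_inplace_removeAB_C (s : String) (out : String) : Prop := out = inplace_removeAB_C_alt s
instance (s : String) (out : String) : Decidable (Spec_inplace_removeAB_C s out) := by unfold Spec_inplace_removeAB_C; infer_instance

-- ===== CLAIM (what is proved, stated in full; the proofs are below) =====
def Claim_equal_inplace_removeAB_C : Prop := ∀ (s : String), Dom_inplace_removeAB_C s → Spec_inplace_removeAB_C s (inplace_removeAB_C s)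

-- ===== LEMMAS AND PROOFS =====

-- abstract left-to-right stack step of A's loop (stack stored reversed: head = top = s[k-1])
def stepL (st : List Char) (c : Char) : List Char :=
  if c = 'B' ∧ st.head? = some 'A' then st.tail
  else if c = 'C' then st
  else c :: st

-- right-to-left reduction step (B's stepB with the accumulator reversed, head-first)
def gR (c : Char) (r : List Char) : List Char :=
  if c = 'C' then r
  else if c = 'A' ∧ r.head? = some 'B' then r.tail
  else c :: r

-- pour the stack (top first) onto a reduced suffix
def pour (st r : List Char) : List Char :=
  match st with
  | [] => r
  | a :: t => pour t (gR a r)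

-- invariant of A's stack: never a 'B' directly above an 'A'
def NoBA : List Char → Prop
  | a :: b :: t => ¬(a = 'B' ∧ b = 'A') ∧ NoBA (b :: t)
  | _ => True

def StkInv (st : List Char) : Prop := 'C' ∉ st ∧ NoBA st

lemma stepL_C (st : List Char) : stepL st 'C' = st := by simp [stepL]

lemma stepL_push (st : List Char) (c : Char)
    (h1 : ¬(c = 'B' ∧ st.head? = some 'A')) (h2 : c ≠ 'C') : stepL st c = c :: st := by
  rw [stepL, if_neg h1, if_neg h2]

lemma gR_push (c : Char) (r : List Char)
    (h1 : c ≠ 'C') (h2 : ¬(c = 'A' ∧ r.head? = some 'B')) : gR c r = c :: r := by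
  rw [gR, if_neg h1, if_neg h2]

lemma pour_step (st : List Char) (c : Char) (r : List Char) :
    pour (stepL st c) r = pour st (gR c r) := by
  by_cases h1 : c = 'B' ∧ st.head? = some 'A'
  · obtain ⟨hc, hh⟩ := h1
    cases st with
    | nil => simp at hh
    | cons a t =>
      simp only [List.head?_cons, Option.some.injEq] at hh
      subst hc hh
      show pour (stepL ('A' :: t) 'B') r = pour t (gR 'A' (gR 'B' r))
      have h2 : gR 'B' r = 'B' :: r := gR_push _ _ (by decide) (by simp)
      have h3 : gR 'A' ('B' :: r) = r := by simp [gR]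
      rw [h2, h3, stepL, if_pos ⟨rfl, rfl⟩]
      rfl
  · by_cases h2 : c = 'C'
    · subst h2; rw [stepL_C]; simp [gR]
    · rw [stepL_push st c h1 h2]
      rfl

lemma pour_foldl (l : List Char) : ∀ (st r : List Char),
    pour (List.foldl stepL st l) r = pour st (List.foldr gR r l) := by
  induction l with
  | nil => intro st r; simp
  | cons c l ih =>
    intro st r
    simp only [List.foldl_cons, List.foldr_cons]
    rw [ih, pour_step]

lemma NoBA_tail (a : Char) (t : List Char) (h : NoBA (a :: t)) : NoBA t := by
  cases t with
  | nil => trivial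
  | cons b t' => exact h.2

lemma pour_reduced (st : List Char) : ∀ (r : List Char),
    StkInv st → (∀ b, st.head? = some b → ¬(b = 'A' ∧ r.head? = some 'B')) →
    pour st r = st.reverse ++ r := by
  induction st with
  | nil => intro r _ _; simp [pour]
  | cons a t ih =>
    intro r ⟨hC, hch⟩ hside
    have haC : a ≠ 'C' := by simp at hC; tauto
    have hg : gR a r = a :: r := gR_push _ _ haC (hside a rfl)
    have hC' : 'C' ∉ t := by simp at hC; tauto
    have hside' : ∀ b, t.head? = some b → ¬(b = 'A' ∧ (a :: r).head? = some 'B') := by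
      intro b hb
      rintro ⟨hbA, hhead⟩
      simp only [List.head?_cons, Option.some.injEq] at hhead
      cases t with
      | nil => simp at hb
      | cons x t' =>
        simp only [List.head?_cons, Option.some.injEq] at hb
        subst hb
        exact hch.1 ⟨hhead, hbA⟩
    calc pour (a :: t) r = pour t (a :: r) := by simp [pour, hg]
      _ = t.reverse ++ a :: r := ih (a :: r) ⟨hC', NoBA_tail a t hch⟩ hside'
      _ = (a :: t).reverse ++ r := by simp

lemma StkInv_step (st : List Char) (c : Char) (h : StkInv st) : StkInv (stepL st c) := by
  obtain ⟨hC, hch⟩ := h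
  by_cases h1 : c = 'B' ∧ st.head? = some 'A'
  · rw [stepL, if_pos h1]
    exact ⟨fun hm => hC (List.mem_of_mem_tail hm), by
      cases st with
      | nil => trivial
      | cons a t => exact NoBA_tail a t hch⟩
  · by_cases h2 : c = 'C'
    · subst h2; rw [stepL_C]; exact ⟨hC, hch⟩
    · rw [stepL_push st c h1 h2]
      refine ⟨by simp; exact ⟨fun hc => h2 hc.symm, hC⟩, ?_⟩
      cases st with
      | nil => trivial
      | cons a t =>
        refine ⟨?_, hch⟩
        rintro ⟨hcB, haA⟩
        exact h1 ⟨hcB, by rw [haA]; rfl⟩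

lemma StkInv_foldl (l : List Char) : ∀ st, StkInv st → StkInv (List.foldl stepL st l) := by
  induction l with
  | nil => intro st h; simpa
  | cons c l ih => intro st h; exact ih _ (StkInv_step st c h)

lemma getLast?_take (s : List Char) (k : Nat) (h : k - 1 < s.length) (h0 : 0 < k) :
    (s.take k).getLast? = s[k - 1]? := by
  rw [List.getLast?_eq_getElem?]
  have hl : (s.take k).length = min k s.length := List.length_take ..
  rw [hl, List.getElem?_take_of_lt (by omega)]
  congr 1
  omega

lemma dropLast_take (s : List Char) (k : Nat) (h : k ≤ s.length) :
    (s.take k).dropLast = s.take (k - 1) := by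
  rw [List.dropLast_eq_take, List.take_take]
  congr 1
  simp only [List.length_take]
  omega

-- A's loop computes the stack fold: s.take k reversed is the stack, s.drop i the remaining input
lemma loopA_eq (n : Nat) : ∀ (s : List Char) (i k : Nat), s.length - i = n → k ≤ i →
    ((loopA s i k).1.take (loopA s i k).2) =
      (List.foldl stepL ((s.take k).reverse) (s.drop i)).reverse := by
  induction n with
  | zero =>
    intro s i k hn hk
    have hlen : ¬ i < s.length := by omega
    rw [loopA, dif_neg hlen]
    simp [List.drop_eq_nil_of_le (by omega : s.length ≤ i)]
  | succ n ih =>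
    intro s i k hn hk
    have hlen : i < s.length := by omega
    have hgi : s.getD i ' ' = s[i] := List.getD_eq_getElem s ' ' hlen
    have hdrop : s.drop i = s.getD i ' ' :: s.drop (i + 1) := by
      rw [hgi]; exact List.drop_eq_getElem_cons hlen
    have hlast : ∀ hk0 : 0 < k, ((s.take k).reverse).head? = some (s.getD (k - 1) ' ') := by
      intro hk0
      have hk1 : k - 1 < s.length := by omega
      rw [List.head?_reverse, getLast?_take s k hk1 hk0,
        List.getElem?_eq_getElem hk1, List.getD_eq_getElem s ' ' hk1]
    by_cases h1 : s.getD i ' ' = 'B' ∧ k > 0 ∧ s.getD (k - 1) ' ' = 'A'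
    · obtain ⟨hB, hk0, hA⟩ := h1
      have hstep : stepL ((s.take k).reverse) (s.getD i ' ') = (s.take (k - 1)).reverse := by
        rw [hB, stepL, if_pos ⟨rfl, by rw [hlast hk0, hA]⟩, List.tail_reverse, dropLast_take s k (by omega)]
      rw [loopA, dif_pos hlen, if_pos ⟨hB, hk0, hA⟩,
        ih s (i + 1) (k - 1) (by omega) (by omega), hdrop, List.foldl_cons, hstep]
    · by_cases h2 : s.getD i ' ' = 'C'
      · have hstep : stepL ((s.take k).reverse) (s.getD i ' ') = (s.take k).reverse := by
          rw [h2, stepL_C]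
        rw [loopA, dif_pos hlen, if_neg h1, if_pos h2,
          ih s (i + 1) k (by omega) (by omega), hdrop, List.foldl_cons, hstep]
      · have hkk : k < s.length := lt_of_le_of_lt hk hlen
        have hcond : ¬(s.getD i ' ' = 'B' ∧ ((s.take k).reverse).head? = some 'A') := by
          rintro ⟨hB, hh⟩
          rcases Nat.eq_zero_or_pos k with h0 | hk0
          · subst h0; simp at hh
          · rw [hlast hk0] at hh
            exact h1 ⟨hB, hk0, by injection hh⟩
        have hstep : stepL ((s.take k).reverse) (s.getD i ' ')
            = s.getD i ' ' :: (s.take k).reverse := stepL_push _ _ hcond h2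
        have hset_drop : (s.set k (s.getD i ' ')).drop (i + 1) = s.drop (i + 1) :=
          List.drop_set_of_lt (by omega)
        have hset_take : (s.set k (s.getD i ' ')).take (k + 1) = s.take k ++ [s.getD i ' '] := by
          rw [List.set_eq_take_append_cons_drop, if_pos hkk, List.take_append]
          simp [List.length_take, Nat.min_eq_left hkk.le]
        rw [loopA, dif_pos hlen, if_neg h1, if_neg h2,
          ih (s.set k (s.getD i ' ')) (i + 1) (k + 1) (by simp [List.length_set]; omega) (by omega),
          hset_drop, hset_take, hdrop, List.foldl_cons, hstep, List.reverse_append]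
        rfl

-- B's foldl, with the accumulator reversed, is the foldl of gR
lemma stepB_reverse (rev : List Char) (ch : Char) :
    (stepB rev ch).reverse = gR ch rev.reverse := by
  rw [stepB, gR, ← List.head?_reverse]
  split_ifs with h1 h2
  · rfl
  · rw [← List.tail_reverse]
  · rw [List.reverse_append]; rfl

lemma foldlB_reverse (l : List Char) : ∀ (rev : List Char),
    (List.foldl stepB rev l).reverse = List.foldl (fun r c => gR c r) rev.reverse l := by
  induction l with
  | nil => intro rev; simp
  | cons c l ih => intro rev; simp only [List.foldl_cons]; rw [ih, stepB_reverse]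

lemma main_eq (l : List Char) :
    (List.foldl stepL [] l).reverse = List.foldr gR [] l := by
  have hInv : StkInv (List.foldl stepL [] l) := StkInv_foldl l [] ⟨by simp, trivial⟩
  have h1 : pour (List.foldl stepL [] l) [] = List.foldr gR [] l := by
    rw [pour_foldl]; rfl
  have h2 : pour (List.foldl stepL [] l) [] = (List.foldl stepL [] l).reverse ++ [] :=
    pour_reduced _ [] hInv (by intro b _; rintro ⟨_, h⟩; simp at h)
  rw [← h1, h2, List.append_nil]

-- ===== VERDICT (by name: the statement is the Claim_ definition above) =====
theorem inplace_removeAB_C_spec : Claim_equal_inplace_removeAB_C := by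
  intro s _
  simp only [Spec_inplace_removeAB_C, inplace_removeAB_C, inplace_removeAB_C_alt]
  have hA := loopA_eq (s.toList.length - 0) s.toList 0 0 rfl (le_refl 0)
  simp only at hA
  rw [hA]
  rw [foldlB_reverse]
  simp only [List.take_zero, List.reverse_nil, List.drop_zero]
  rw [List.foldl_reverse]
  congr 1
  exact main_eq s.toList
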